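-- pv_equiv track=rewrite | github.com/vpsmoju/docfinance | documentos/templatetags/custom_filters.py | _numero_extenso
-- ===== SOURCE A (Python) =====
-- def _numero_extenso(n):
--     """Converte número inteiro (0..999999999) para extenso em português."""
--     unidades = [
--         "zero",
--         "um",
--         "dois",
--         "três",
--         "quatro",
--         "cinco",
--         "seis",
--         "sete",
--         "oito",
--         "nove",
--     ]
--     especiais = {
--         10: "dez",
--         11: "onze",
--         12: "doze",
--         13: "treze",
--         14: "quatorze",
--         15: "quinze",
--         16: "dezesseis",
--         17: "dezessete",
--         18: "dezoito",
--         19: "dezenove",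
--     }
--     dezenas = [
--         "",
--         "",
--         "vinte",
--         "trinta",
--         "quarenta",
--         "cinquenta",
--         "sessenta",
--         "setenta",
--         "oitenta",
--         "noventa",
--     ]
--     centenas = [
--         "",
--         "cento",
--         "duzentos",
--         "trezentos",
--         "quatrocentos",
--         "quinhentos",
--         "seiscentos",
--         "setecentos",
--         "oitocentos",
--         "novecentos",
--     ]
--
--     if n == 0:
--         return "zero"
--     if n == 100:
--         return "cem"
--
--     def trio(x):
--         c = x // 100
--         r = x % 100
--         d = r // 10
--         u = r % 10
--         partes = []
--         if c:
--             partes.append(centenas[c])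
--         if 10 <= r <= 19:
--             partes.append(especiais[r])
--         else:
--             if d:
--                 partes.append(dezenas[d])
--             if u:
--                 if d:
--                     partes.append("e " + unidades[u])
--                 else:
--                     partes.append(unidades[u])
--         return " ".join([p for p in partes if p])
--
--     milhoes = n // 1_000_000
--     resto = n % 1_000_000
--     milhares = resto // 1_000
--     centenas_final = resto % 1_000
--
--     partes = []
--     if milhoes:
--         partes.append(trio(milhoes) + (" milhão" if milhoes == 1 else " milhões"))
--     if milhares:
--         if milhoes and (milhares or centenas_final):
--             partes.append("e " + trio(milhares) + " mil")
--         else: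
--             partes.append(trio(milhares) + " mil")
--     if centenas_final:
--         if (milhoes or milhares) and centenas_final:
--             partes.append("e " + trio(centenas_final))
--         else:
--             partes.append(trio(centenas_final))
--     return " ".join(partes).strip()
-- ===== SOURCE B (Python) =====
-- def _numero_extenso(n):
--     """Converte número inteiro (0..999999999) para extenso em português."""
--     base = ["zero", "um", "dois", "três", "quatro", "cinco", "seis", "sete",
--             "oito", "nove", "dez", "onze", "doze", "treze", "quatorze",
--             "quinze", "dezesseis", "dezessete", "dezoito", "dezenove"]
--     dezenas = ["", "", "vinte", "trinta", "quarenta", "cinquenta", "sessenta",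
--                "setenta", "oitenta", "noventa"]
--     centenas = ["", "cento", "duzentos", "trezentos", "quatrocentos", "quinhentos",
--                 "seiscentos", "setecentos", "oitocentos", "novecentos"]
--
--     if n == 0:
--         return "zero"
--     if n == 100:
--         return "cem"
--
--     # Single recursive descent over the scales: each level spells its leading
--     # group and recurses on the remainder, concatenating connectors directly.
--     def rec(x):
--         if x < 20:
--             return base[x]
--         if x < 100:
--             d, u = divmod(x, 10)
--             return dezenas[d] + (" e " + base[u] if u else "")
--         if x < 1000:
--             c, r = divmod(x, 100)
--             return centenas[c] + (" " + rec(r) if r else "")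
--         if x < 1_000_000:
--             k, r = divmod(x, 1000)
--             return rec(k) + " mil" + (" e " + rec(r) if r else "")
--         m, r = divmod(x, 1_000_000)
--         return rec(m) + (" milhão" if m == 1 else " milhões") + (" e " + rec(r) if r else "")
--
--     return rec(n)
-- ===== Notes on version B (the rewrite author's own statement) =====
-- stated objective: alternative
-- what changed: Replaces A's trio helper plus three staged magnitude blocks with parts-list/join/strip by a single recursive descent over the scales (one merged 0..19 word table, direct string concatenation of connectors, no list building, no join, no strip).
-- outside the precondition, e.g. on _numero_extenso(-1000000): A returns 'novecentos noventa e nove milhões', B raises IndexError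
import Mathlib
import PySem

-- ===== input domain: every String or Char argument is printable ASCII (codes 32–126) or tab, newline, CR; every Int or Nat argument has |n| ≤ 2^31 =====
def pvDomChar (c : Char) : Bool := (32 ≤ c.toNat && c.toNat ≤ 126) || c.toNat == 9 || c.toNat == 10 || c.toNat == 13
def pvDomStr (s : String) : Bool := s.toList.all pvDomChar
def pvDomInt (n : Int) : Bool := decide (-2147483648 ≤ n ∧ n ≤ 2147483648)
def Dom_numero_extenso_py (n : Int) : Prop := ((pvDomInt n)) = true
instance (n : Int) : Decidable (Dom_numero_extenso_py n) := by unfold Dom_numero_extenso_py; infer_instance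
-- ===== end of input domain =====

-- B replaces A's trio helper plus three staged magnitude blocks (parts list,
-- join, strip) by a single recursive descent over the scales with direct
-- string concatenation (objective: alternative decomposition, same cost).

-- ===== PORT A =====
-- A's number tables
def pvUnidades : List String :=
  ["zero", "um", "dois", "três", "quatro", "cinco", "seis", "sete", "oito", "nove"]
def pvEspeciais : PySem.Dict Int String := PySem.Dict.ofList
  [(10, "dez"), (11, "onze"), (12, "doze"), (13, "treze"), (14, "quatorze"),
   (15, "quinze"), (16, "dezesseis"), (17, "dezessete"), (18, "dezoito"), (19, "dezenove")]
def pvDezenas : List String :=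
  ["", "", "vinte", "trinta", "quarenta", "cinquenta", "sessenta", "setenta", "oitenta", "noventa"]
def pvCentenas : List String :=
  ["", "cento", "duzentos", "trezentos", "quatrocentos", "quinhentos",
   "seiscentos", "setecentos", "oitocentos", "novecentos"]

-- A's inner helper trio(x); table lookups use pyGetD/dict get? with a dummy
-- default: Pre_ keeps every reachable index in range (A raises IndexError outside).
def pvTrio (x : Int) : String :=
  let c := PySem.Int.floordiv x 100
  let r := PySem.Int.mod x 100
  let d := PySem.Int.floordiv r 10
  let u := PySem.Int.mod r 10
  let partes : List String :=
    (if c ≠ 0 then [PySem.List.pyGetD pvCentenas c ""] else []) ++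
    (if 10 ≤ r ∧ r ≤ 19 then [(PySem.Dict.get? pvEspeciais r).getD ""]
     else
       (if d ≠ 0 then [PySem.List.pyGetD pvDezenas d ""] else []) ++
       (if u ≠ 0 then
          [if d ≠ 0 then "e " ++ PySem.List.pyGetD pvUnidades u ""
           else PySem.List.pyGetD pvUnidades u ""]
        else []))
  PySem.Str.join " " (partes.filter (fun p => p ≠ ""))

def numero_extenso_py (n : Int) : String :=
  if n = 0 then "zero"
  else if n = 100 then "cem"
  else
    let milhoes := PySem.Int.floordiv n 1000000
    let resto := PySem.Int.mod n 1000000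
    let milhares := PySem.Int.floordiv resto 1000
    let centenas_final := PySem.Int.mod resto 1000
    let partes : List String :=
      (if milhoes ≠ 0 then
         [pvTrio milhoes ++ (if milhoes = 1 then " milhão" else " milhões")] else []) ++
      (if milhares ≠ 0 then
         [if milhoes ≠ 0 ∧ (milhares ≠ 0 ∨ centenas_final ≠ 0) then
            "e " ++ pvTrio milhares ++ " mil"
          else pvTrio milhares ++ " mil"] else []) ++
      (if centenas_final ≠ 0 then
         [if (milhoes ≠ 0 ∨ milhares ≠ 0) ∧ centenas_final ≠ 0 then
            "e " ++ pvTrio centenas_final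
          else pvTrio centenas_final] else [])
    PySem.Str.strip (PySem.Str.join " " partes)

-- ===== PORT B =====
-- B's merged 0..19 word table (B keeps dezenas/centenas, shared above)
def pvBase20 : List String :=
  ["zero", "um", "dois", "três", "quatro", "cinco", "seis", "sete", "oito", "nove",
   "dez", "onze", "doze", "treze", "quatorze", "quinze", "dezesseis", "dezessete",
   "dezoito", "dezenove"]

-- B's recursive rec(x); the Nat fuel only makes the recursion structural: the
-- call depth is at most 3 on every input, so fuel 4 at the call site is never
-- exhausted (a totality guard, not part of B's algorithm).
def pvRec : Nat → Int → String
  | 0, _ => ""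
  | fuel + 1, x =>
    if x < 20 then PySem.List.pyGetD pvBase20 x ""
    else if x < 100 then
      let d := PySem.Int.floordiv x 10
      let u := PySem.Int.mod x 10
      PySem.List.pyGetD pvDezenas d "" ++
        (if u ≠ 0 then " e " ++ PySem.List.pyGetD pvBase20 u "" else "")
    else if x < 1000 then
      let c := PySem.Int.floordiv x 100
      let r := PySem.Int.mod x 100
      PySem.List.pyGetD pvCentenas c "" ++ (if r ≠ 0 then " " ++ pvRec fuel r else "")
    else if x < 1000000 then
      let k := PySem.Int.floordiv x 1000
      let r := PySem.Int.mod x 1000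
      pvRec fuel k ++ " mil" ++ (if r ≠ 0 then " e " ++ pvRec fuel r else "")
    else
      let m := PySem.Int.floordiv x 1000000
      let r := PySem.Int.mod x 1000000
      pvRec fuel m ++ (if m = 1 then " milhão" else " milhões") ++
        (if r ≠ 0 then " e " ++ pvRec fuel r else "")

def numero_extenso_py_alt (n : Int) : String :=
  if n = 0 then "zero"
  else if n = 100 then "cem"
  else pvRec 4 n

-- ===== PRECONDITION & SPEC =====
-- Pre_ restricts to the docstring's natural domain 0..999999999: for n ≥ 10^9
-- (and n < -10^9) A raises IndexError, and for negative n A's value is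
-- negative-index-wraparound garbage outside the function's stated purpose
-- (excluded examples cited in the claim).
def Pre_numero_extenso_py (n : Int) : Prop := 0 ≤ n ∧ n < 1000000000
instance (n : Int) : Decidable (Pre_numero_extenso_py n) := by
  unfold Pre_numero_extenso_py; infer_instance
def pvWitness_numero_extenso_py : Int := (123456789)

def Spec_numero_extenso_py (n : Int) (out : String) : Prop := out = numero_extenso_py_alt n
instance (n : Int) (out : String) : Decidable (Spec_numero_extenso_py n out) := by
  unfold Spec_numero_extenso_py; infer_instance

-- ===== CLAIM (what is proved, stated in full; the proofs are below) =====
def Claim_equal_numero_extenso_py : Prop :=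
  ∀ (n : Int), Dom_numero_extenso_py n → Pre_numero_extenso_py n →
    Spec_numero_extenso_py n (numero_extenso_py n)

-- ===== LEMMAS AND PROOFS =====

-- proof-only predicates: first/last character exists and is not whitespace
def pvHeadOK (cs : List Char) : Bool := !PySem.Chars.isspace (cs.head?.getD ' ')
def pvLastOK (cs : List Char) : Bool := !PySem.Chars.isspace (cs.getLast?.getD ' ')

theorem pv_str_ext {s t : String} (h : s.toList = t.toList) : s = t := by
  have := congrArg String.ofList h
  simpa using this

theorem pv_lstrip_id {cs : List Char} (h : pvHeadOK cs = true) :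
    PySem.Chars.lstrip cs = cs := by
  cases cs with
  | nil => rfl
  | cons a t => simp_all [pvHeadOK, PySem.Chars.lstrip]

theorem pv_rstrip_id {cs : List Char} (h : pvLastOK cs = true) :
    PySem.Chars.rstrip cs = cs := by
  unfold PySem.Chars.rstrip
  have hrev : pvHeadOK cs.reverse = true := by
    simpa [pvHeadOK, pvLastOK, List.head?_reverse] using h
  have := pv_lstrip_id hrev
  unfold PySem.Chars.lstrip at this
  rw [this, List.reverse_reverse]

theorem pv_strip_id (s : String) (h1 : pvHeadOK s.toList = true)
    (h2 : pvLastOK s.toList = true) : PySem.Str.strip s = s := by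
  have : PySem.Chars.strip s.toList = s.toList := by
    unfold PySem.Chars.strip
    rw [pv_lstrip_id h1, pv_rstrip_id h2]
  show String.ofList (PySem.Chars.strip s.toList) = s
  rw [this, String.ofList_toList]

theorem pv_headOK_append {a b : List Char} (h : pvHeadOK a = true) :
    pvHeadOK (a ++ b) = true := by
  cases a with
  | nil => simp [pvHeadOK, PySem.Chars.isspace] at h
  | cons x t => simpa [pvHeadOK] using h

theorem pv_lastOK_append {a b : List Char} (h : pvLastOK b = true) :
    pvLastOK (a ++ b) = true := by
  have hb : b ≠ [] := by
    rintro rfl; simp [pvLastOK, PySem.Chars.isspace] at h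
  rw [pvLastOK, List.getLast?_append_of_ne_nil _ hb]
  exact h

theorem pv_headOK_str_append {a b : String} (h : pvHeadOK a.toList = true) :
    pvHeadOK (a ++ b).toList = true := by
  rw [String.toList_append]; exact pv_headOK_append h

theorem pv_lastOK_str_append {a b : String} (h : pvLastOK b.toList = true) :
    pvLastOK (a ++ b).toList = true := by
  rw [String.toList_append]; exact pv_lastOK_append h

-- join " " on Strings, unfolded one element at a time
theorem pv_join_singleton (a : String) : PySem.Str.join " " [a] = a := by
  show String.ofList (PySem.Chars.join " ".toList [a.toList]) = a
  rw [PySem.Chars.join_singleton, String.ofList_toList]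

theorem pv_join_cons (a b : String) (t : List String) :
    PySem.Str.join " " (a :: b :: t) = a ++ " " ++ PySem.Str.join " " (b :: t) := by
  show String.ofList (PySem.Chars.join " ".toList (a.toList :: b.toList :: t.map String.toList)) = _
  rw [PySem.Chars.join_cons_cons, String.ofList_append, String.ofList_append,
      String.ofList_toList]
  rfl

-- the word tables: entries 1..9 of centenas are non-space-delimited non-empty words
theorem pv_cent_facts (m : Nat) (h1 : 1 ≤ m) (h2 : m < 10) :
    pvCentenas.getD m "" ≠ "" ∧ pvHeadOK (pvCentenas.getD m "").toList = true ∧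
      pvLastOK (pvCentenas.getD m "").toList = true := by
  interval_cases m <;> exact ⟨by decide, by decide, by decide⟩

-- the low range 1..99: trio agrees with rec and yields a good word
theorem pv_low_tab (m : Nat) (h1 : 1 ≤ m) (h2 : m < 100) :
    pvTrio (m : Int) = pvRec 1 (m : Int) ∧ pvHeadOK (pvTrio (m : Int)).toList = true ∧
      pvLastOK (pvTrio (m : Int)).toList = true := by
  interval_cases m <;> exact ⟨by decide, by decide, by decide⟩

theorem pv_low_tab' (x : Int) (h1 : 1 ≤ x) (h2 : x < 100) :
    pvTrio x = pvRec 1 x ∧ pvHeadOK (pvTrio x).toList = true ∧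
      pvLastOK (pvTrio x).toList = true := by
  have hx : x = ((x.toNat : Nat) : Int) := by omega
  rw [hx]
  exact pv_low_tab x.toNat (by omega) (by omega)

-- the body of pvRec at successor fuel, written out (zeta-reduced), by rfl
theorem pv_rec_body (f : Nat) (x : Int) : pvRec (f + 1) x =
    (if x < 20 then PySem.List.pyGetD pvBase20 x ""
     else if x < 100 then
       PySem.List.pyGetD pvDezenas (PySem.Int.floordiv x 10) "" ++
         (if PySem.Int.mod x 10 ≠ 0 then
            " e " ++ PySem.List.pyGetD pvBase20 (PySem.Int.mod x 10) "" else "")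
     else if x < 1000 then
       PySem.List.pyGetD pvCentenas (PySem.Int.floordiv x 100) "" ++
         (if PySem.Int.mod x 100 ≠ 0 then " " ++ pvRec f (PySem.Int.mod x 100) else "")
     else if x < 1000000 then
       pvRec f (PySem.Int.floordiv x 1000) ++ " mil" ++
         (if PySem.Int.mod x 1000 ≠ 0 then " e " ++ pvRec f (PySem.Int.mod x 1000) else "")
     else
       pvRec f (PySem.Int.floordiv x 1000000) ++
         (if PySem.Int.floordiv x 1000000 = 1 then " milhão" else " milhões") ++
         (if PySem.Int.mod x 1000000 ≠ 0 then
            " e " ++ pvRec f (PySem.Int.mod x 1000000) else "")) := rfl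

-- fuel irrelevance: below 100 no recursion happens, below 1000 depth ≤ 1
theorem pv_pvRec_low (f : Nat) (x : Int) (hx : x < 100) :
    pvRec (f + 1) x = pvRec 1 x := by
  rw [pv_rec_body f, pv_rec_body 0]
  by_cases h1 : x < 20
  · rw [if_pos h1, if_pos h1]
  · rw [if_neg h1, if_neg h1, if_pos hx, if_pos hx]

theorem pv_pvRec_mid (f : Nat) (x : Int) (hx : x < 1000) :
    pvRec (f + 2) x = pvRec 2 x := by
  have e1 : pvRec (f + 2) x = pvRec (f + 1 + 1) x := rfl
  have e2 : pvRec 2 x = pvRec (1 + 1) x := rfl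
  rw [e1, e2, pv_rec_body (f + 1), pv_rec_body 1]
  by_cases h1 : x < 20
  · rw [if_pos h1, if_pos h1]
  · rw [if_neg h1, if_neg h1]
    by_cases h2 : x < 100
    · rw [if_pos h2, if_pos h2]
    · rw [if_neg h2, if_neg h2, if_pos hx, if_pos hx]
      have hr : PySem.Int.mod x 100 < 100 := PySem.Int.mod_lt _ (by norm_num)
      rw [pv_pvRec_low f _ hr]

-- arithmetic bridges
theorem pv_fd (a : Int) (b : Int) (hb : (0:Int) < b) : PySem.Int.floordiv a b = a / b :=
  PySem.Int.floordiv_eq_ediv_of_pos hb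

theorem pv_md (a : Int) (b : Int) (hb : (0:Int) < b) : PySem.Int.mod a b = a % b :=
  PySem.Int.mod_eq_emod_of_pos hb

-- definitional bodies, written out (zeta-reduced), proved by rfl
theorem pv_trio_body (x : Int) : pvTrio x = PySem.Str.join " " (((
    (if PySem.Int.floordiv x 100 ≠ 0 then
       [PySem.List.pyGetD pvCentenas (PySem.Int.floordiv x 100) ""] else []) ++
    (if 10 ≤ PySem.Int.mod x 100 ∧ PySem.Int.mod x 100 ≤ 19 then
       [(PySem.Dict.get? pvEspeciais (PySem.Int.mod x 100)).getD ""]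
     else
       (if PySem.Int.floordiv (PySem.Int.mod x 100) 10 ≠ 0 then
          [PySem.List.pyGetD pvDezenas (PySem.Int.floordiv (PySem.Int.mod x 100) 10) ""] else []) ++
       (if PySem.Int.mod (PySem.Int.mod x 100) 10 ≠ 0 then
          [if PySem.Int.floordiv (PySem.Int.mod x 100) 10 ≠ 0 then
             "e " ++ PySem.List.pyGetD pvUnidades (PySem.Int.mod (PySem.Int.mod x 100) 10) ""
           else PySem.List.pyGetD pvUnidades (PySem.Int.mod (PySem.Int.mod x 100) 10) ""]
        else []))).filter (fun p => p ≠ ""))) := rfl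

theorem pv_join_nil : PySem.Str.join " " ([] : List String) = "" := rfl

theorem pv_filter_cons_ne (a : String) (ha : a ≠ "") (T : List String) :
    (a :: T).filter (fun p => p ≠ "") = a :: T.filter (fun p => p ≠ "") := by
  simp [ha]

theorem pv_join_head (cent : String) (T : List String) :
    PySem.Str.join " " (cent :: T) =
      cent ++ (if T = [] then "" else " " ++ PySem.Str.join " " T) := by
  cases T with
  | nil => simp [pv_join_singleton]
  | cons b t =>
      rw [pv_join_cons, if_neg (by simp)]
      rw [String.append_assoc]

-- trio on 100..999 splits as centenas word plus (optionally) trio of the rest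
theorem pv_trio_high (x : Int) (h1 : 100 ≤ x) (h2 : x < 1000) :
    pvTrio x = PySem.List.pyGetD pvCentenas (PySem.Int.floordiv x 100) "" ++
      (if PySem.Int.mod x 100 ≠ 0 then " " ++ pvTrio (PySem.Int.mod x 100) else "") := by
  have hc : PySem.Int.floordiv x 100 = x / 100 := pv_fd _ _ (by norm_num)
  have hr : PySem.Int.mod x 100 = x % 100 := pv_md _ _ (by norm_num)
  have hcne : PySem.Int.floordiv x 100 ≠ 0 := by rw [hc]; omega
  have hcn : PySem.Int.floordiv x 100 = (((x / 100).toNat : Nat) : Int) := by rw [hc]; omega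
  have hcent := pv_cent_facts (x / 100).toNat (by omega) (by omega)
  have hgetD : PySem.List.pyGetD pvCentenas (PySem.Int.floordiv x 100) "" =
      pvCentenas.getD (x / 100).toNat "" := by rw [hcn, PySem.List.pyGetD_natCast]
  have hcne' : PySem.List.pyGetD pvCentenas (PySem.Int.floordiv x 100) "" ≠ "" := by
    rw [hgetD]; exact hcent.1
  have hfd0 : PySem.Int.floordiv (PySem.Int.mod x 100) 100 = 0 := by
    rw [pv_fd _ _ (by norm_num), hr]; omega
  have hmd0 : PySem.Int.mod (PySem.Int.mod x 100) 100 = PySem.Int.mod x 100 := by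
    rw [pv_md _ _ (by norm_num)]; rw [hr]; omega
  rw [pv_trio_body x, if_pos hcne]
  rw [List.singleton_append, pv_filter_cons_ne _ hcne', pv_join_head]
  congr 1
  by_cases hr0 : PySem.Int.mod x 100 = 0
  · rw [hr0]
    decide
  · have hTr : pvTrio (PySem.Int.mod x 100) = PySem.Str.join " "
        (((if 10 ≤ PySem.Int.mod x 100 ∧ PySem.Int.mod x 100 ≤ 19 then
            [(PySem.Dict.get? pvEspeciais (PySem.Int.mod x 100)).getD ""]
          else
            (if PySem.Int.floordiv (PySem.Int.mod x 100) 10 ≠ 0 then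
               [PySem.List.pyGetD pvDezenas (PySem.Int.floordiv (PySem.Int.mod x 100) 10) ""]
             else []) ++
            (if PySem.Int.mod (PySem.Int.mod x 100) 10 ≠ 0 then
               [if PySem.Int.floordiv (PySem.Int.mod x 100) 10 ≠ 0 then
                  "e " ++ PySem.List.pyGetD pvUnidades (PySem.Int.mod (PySem.Int.mod x 100) 10) ""
                else PySem.List.pyGetD pvUnidades (PySem.Int.mod (PySem.Int.mod x 100) 10) ""]
             else []))).filter (fun p => p ≠ "")) := by
      rw [pv_trio_body (PySem.Int.mod x 100), hmd0, hfd0,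
          if_neg (show ¬((0:Int) ≠ 0) from fun h => h rfl), List.nil_append]
    have hgood := (pv_low_tab' (PySem.Int.mod x 100) (by omega) (by omega)).2.1
    have hne : ¬ ((((if 10 ≤ PySem.Int.mod x 100 ∧ PySem.Int.mod x 100 ≤ 19 then
            [(PySem.Dict.get? pvEspeciais (PySem.Int.mod x 100)).getD ""]
          else
            (if PySem.Int.floordiv (PySem.Int.mod x 100) 10 ≠ 0 then
               [PySem.List.pyGetD pvDezenas (PySem.Int.floordiv (PySem.Int.mod x 100) 10) ""]
             else []) ++
            (if PySem.Int.mod (PySem.Int.mod x 100) 10 ≠ 0 then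
               [if PySem.Int.floordiv (PySem.Int.mod x 100) 10 ≠ 0 then
                  "e " ++ PySem.List.pyGetD pvUnidades (PySem.Int.mod (PySem.Int.mod x 100) 10) ""
                else PySem.List.pyGetD pvUnidades (PySem.Int.mod (PySem.Int.mod x 100) 10) ""]
             else []))).filter (fun p => p ≠ "")) = []) := by
      intro hnil
      rw [hnil, pv_join_nil] at hTr
      rw [hTr] at hgood
      exact absurd hgood (by decide)
    rw [if_neg hne, if_pos hr0, ← hTr]

-- trio = rec on all of 1..999
theorem pv_trio_eq (x : Int) (h1 : 1 ≤ x) (h2 : x < 1000) (f : Nat) :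
    pvTrio x = pvRec (f + 2) x := by
  by_cases hlow : x < 100
  · have e1 : pvRec (f + 2) x = pvRec (f + 1 + 1) x := rfl
    rw [e1, pv_pvRec_low (f + 1) x hlow]
    exact (pv_low_tab' x h1 hlow).1
  · have hx1 : 100 ≤ x := by omega
    have hrlt : PySem.Int.mod x 100 < 100 := PySem.Int.mod_lt _ (by norm_num)
    have hrge : 0 ≤ PySem.Int.mod x 100 := PySem.Int.mod_nonneg _ (by norm_num)
    rw [pv_trio_high x hx1 h2]
    have e1 : pvRec (f + 2) x = pvRec (f + 1 + 1) x := rfl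
    rw [e1, pv_rec_body (f + 1), if_neg (by omega : ¬ x < 20), if_neg hlow,
        if_pos h2]
    congr 1
    by_cases hr0 : PySem.Int.mod x 100 = 0
    · rw [if_neg (fun h => h hr0), if_neg (fun h => h hr0)]
    · rw [if_pos hr0, if_pos hr0, pv_pvRec_low f _ hrlt,
          (pv_low_tab' (PySem.Int.mod x 100) (by omega) hrlt).1]

-- trio yields a good word on all of 1..999
theorem pv_trio_good (x : Int) (h1 : 1 ≤ x) (h2 : x < 1000) :
    pvHeadOK (pvTrio x).toList = true ∧ pvLastOK (pvTrio x).toList = true := by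
  by_cases hlow : x < 100
  · exact (pv_low_tab' x h1 hlow).2
  · have hx1 : 100 ≤ x := by omega
    have hc : PySem.Int.floordiv x 100 = x / 100 := pv_fd _ _ (by norm_num)
    have hr : PySem.Int.mod x 100 = x % 100 := pv_md _ _ (by norm_num)
    have hcn : PySem.Int.floordiv x 100 = (((x / 100).toNat : Nat) : Int) := by rw [hc]; omega
    have hcent := pv_cent_facts (x / 100).toNat (by omega) (by omega)
    have hgetD : PySem.List.pyGetD pvCentenas (PySem.Int.floordiv x 100) "" =
        pvCentenas.getD (x / 100).toNat "" := by rw [hcn, PySem.List.pyGetD_natCast]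
    rw [pv_trio_high x hx1 h2]
    constructor
    · apply pv_headOK_str_append
      rw [hgetD]; exact hcent.2.1
    · by_cases hr0 : PySem.Int.mod x 100 = 0
      · rw [if_neg (fun h => h hr0)]
        have : PySem.List.pyGetD pvCentenas (PySem.Int.floordiv x 100) "" ++ "" =
            PySem.List.pyGetD pvCentenas (PySem.Int.floordiv x 100) "" := by
          simp
        rw [this, hgetD]; exact hcent.2.2
      · rw [if_pos hr0]
        apply pv_lastOK_str_append
        apply pv_lastOK_str_append
        exact (pv_low_tab' (PySem.Int.mod x 100) (by omega) (by rw [hr]; omega)).2.2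

-- the body of A past the early returns, written out (zeta-reduced)
theorem pv_A_body (n : Int) (h0 : ¬ n = 0) (h100 : ¬ n = 100) :
    numero_extenso_py n = PySem.Str.strip (PySem.Str.join " " (
      (if PySem.Int.floordiv n 1000000 ≠ 0 then
         [pvTrio (PySem.Int.floordiv n 1000000) ++
           (if PySem.Int.floordiv n 1000000 = 1 then " milhão" else " milhões")] else []) ++
      (if PySem.Int.floordiv (PySem.Int.mod n 1000000) 1000 ≠ 0 then
         [if PySem.Int.floordiv n 1000000 ≠ 0 ∧
             (PySem.Int.floordiv (PySem.Int.mod n 1000000) 1000 ≠ 0 ∨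
              PySem.Int.mod (PySem.Int.mod n 1000000) 1000 ≠ 0) then
            "e " ++ pvTrio (PySem.Int.floordiv (PySem.Int.mod n 1000000) 1000) ++ " mil"
          else pvTrio (PySem.Int.floordiv (PySem.Int.mod n 1000000) 1000) ++ " mil"] else []) ++
      (if PySem.Int.mod (PySem.Int.mod n 1000000) 1000 ≠ 0 then
         [if (PySem.Int.floordiv n 1000000 ≠ 0 ∨
              PySem.Int.floordiv (PySem.Int.mod n 1000000) 1000 ≠ 0) ∧
             PySem.Int.mod (PySem.Int.mod n 1000000) 1000 ≠ 0 then
            "e " ++ pvTrio (PySem.Int.mod (PySem.Int.mod n 1000000) 1000)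
          else pvTrio (PySem.Int.mod (PySem.Int.mod n 1000000) 1000)] else []))) := by
  unfold numero_extenso_py
  rw [if_neg h0, if_neg h100]

theorem pv_B_body (n : Int) (h0 : ¬ n = 0) (h100 : ¬ n = 100) :
    numero_extenso_py_alt n = pvRec 4 n := by
  unfold numero_extenso_py_alt
  rw [if_neg h0, if_neg h100]

-- the main equivalence on 0 ≤ n < 10^9
theorem pv_main (n : Int) (hn0 : 0 ≤ n) (hn9 : n < 1000000000) :
    numero_extenso_py n = numero_extenso_py_alt n := by
  by_cases h0 : n = 0
  · rw [h0]; decide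
  by_cases h100 : n = 100
  · rw [h100]; decide
  have hAb := pv_A_body n h0 h100
  have hBb := pv_B_body n h0 h100
  have hM : PySem.Int.floordiv n 1000000 = n / 1000000 := pv_fd _ _ (by norm_num)
  have hR : PySem.Int.mod n 1000000 = n % 1000000 := pv_md _ _ (by norm_num)
  have hK : PySem.Int.floordiv (PySem.Int.mod n 1000000) 1000 = (n % 1000000) / 1000 := by
    rw [hR]; exact pv_fd _ _ (by norm_num)
  have hC : PySem.Int.mod (PySem.Int.mod n 1000000) 1000 = (n % 1000000) % 1000 := by
    rw [hR]; exact pv_md _ _ (by norm_num)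
  have hlit : ∀ cs : List Char,
      (" ":String).toList ++ (("e ":String).toList ++ cs) = (" e ":String).toList ++ cs :=
    fun cs => by rw [← List.append_assoc]; rfl
  have hmil : pvLastOK ((" mil" : String)).toList = true := by decide
  rw [hAb, hBb]
  by_cases hm : PySem.Int.floordiv n 1000000 = 0
  · -- no millions group: n < 10^6
    have hn6 : n < 1000000 := by rw [hM] at hm; omega
    rw [if_neg (show ¬ PySem.Int.floordiv n 1000000 ≠ 0 from fun h => h hm),
        List.nil_append]
    by_cases hk : PySem.Int.floordiv (PySem.Int.mod n 1000000) 1000 = 0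
    · -- no thousands group either: n = C < 1000
      have hn3 : n < 1000 := by rw [hK] at hk; omega
      have h1n : 1 ≤ n := by omega
      have hCe : PySem.Int.mod (PySem.Int.mod n 1000000) 1000 = n := by rw [hC]; omega
      rw [if_neg (show ¬ PySem.Int.floordiv (PySem.Int.mod n 1000000) 1000 ≠ 0 from
            fun h => h hk),
          List.nil_append, hCe, if_pos (show n ≠ 0 from h0),
          if_neg (show ¬ ((PySem.Int.floordiv n 1000000 ≠ 0 ∨
              PySem.Int.floordiv (PySem.Int.mod n 1000000) 1000 ≠ 0) ∧ n ≠ 0) from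
            fun h => h.1.elim (fun h' => h' hm) (fun h' => h' hk)),
          pv_join_singleton,
          pv_strip_id _ (pv_trio_good n h1n hn3).1 (pv_trio_good n h1n hn3).2]
      have hB4 : pvRec 4 n = pvRec 2 n := pv_pvRec_mid 2 n hn3
      rw [hB4]
      exact pv_trio_eq n h1n hn3 0
    · -- thousands group present: 1000 ≤ n < 10^6
      have hn3 : 1000 ≤ n := by rw [hK] at hk; omega
      have hKs : PySem.Int.floordiv n 1000 = PySem.Int.floordiv (PySem.Int.mod n 1000000) 1000 := by
        rw [hK, pv_fd _ _ (by norm_num)]; omega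
      have hCs : PySem.Int.mod n 1000 = PySem.Int.mod (PySem.Int.mod n 1000000) 1000 := by
        rw [hC, pv_md _ _ (by norm_num)]; omega
      have hK1 : 1 ≤ PySem.Int.floordiv (PySem.Int.mod n 1000000) 1000 := by rw [hK]; omega
      have hK9 : PySem.Int.floordiv (PySem.Int.mod n 1000000) 1000 < 1000 := by rw [hK]; omega
      have hTK : pvTrio (PySem.Int.floordiv (PySem.Int.mod n 1000000) 1000) =
          pvRec 3 (PySem.Int.floordiv (PySem.Int.mod n 1000000) 1000) :=
        pv_trio_eq _ hK1 hK9 1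
      have hKgood := pv_trio_good _ hK1 hK9
      have hB4 : pvRec 4 n =
          pvRec 3 (PySem.Int.floordiv n 1000) ++ " mil" ++
            (if PySem.Int.mod n 1000 ≠ 0 then
               " e " ++ pvRec 3 (PySem.Int.mod n 1000) else "") := by
        have e : pvRec 4 n = pvRec (3 + 1) n := rfl
        rw [e, pv_rec_body 3, if_neg (by omega : ¬ n < 20), if_neg (by omega : ¬ n < 100),
            if_neg (by omega : ¬ n < 1000), if_pos hn6]
      rw [if_pos (show PySem.Int.floordiv (PySem.Int.mod n 1000000) 1000 ≠ 0 from hk),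
          if_neg (show ¬ (PySem.Int.floordiv n 1000000 ≠ 0 ∧
              (PySem.Int.floordiv (PySem.Int.mod n 1000000) 1000 ≠ 0 ∨
               PySem.Int.mod (PySem.Int.mod n 1000000) 1000 ≠ 0)) from fun h => h.1 hm),
          hB4, hKs, hCs]
      by_cases hcz : PySem.Int.mod (PySem.Int.mod n 1000000) 1000 = 0
      · rw [if_neg (show ¬ PySem.Int.mod (PySem.Int.mod n 1000000) 1000 ≠ 0 from
              fun h => h hcz)]
        rw [if_neg (show ¬ PySem.Int.mod (PySem.Int.mod n 1000000) 1000 ≠ 0 from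
              fun h => h hcz)]
        rw [List.append_nil, pv_join_singleton,
            pv_strip_id _ (pv_headOK_str_append hKgood.1) (pv_lastOK_str_append hmil),
            hTK]
        apply pv_str_ext
        simp [String.toList_append]
      · have hC1 : 1 ≤ PySem.Int.mod (PySem.Int.mod n 1000000) 1000 := by
          rw [hC] at hcz ⊢; omega
        have hC9 : PySem.Int.mod (PySem.Int.mod n 1000000) 1000 < 1000 := by rw [hC]; omega
        have hTC : pvTrio (PySem.Int.mod (PySem.Int.mod n 1000000) 1000) =
            pvRec 3 (PySem.Int.mod (PySem.Int.mod n 1000000) 1000) :=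
          pv_trio_eq _ hC1 hC9 1
        have hCgood := pv_trio_good _ hC1 hC9
        rw [if_pos (show PySem.Int.mod (PySem.Int.mod n 1000000) 1000 ≠ 0 from hcz),
            if_pos (show (PySem.Int.floordiv n 1000000 ≠ 0 ∨
                PySem.Int.floordiv (PySem.Int.mod n 1000000) 1000 ≠ 0) ∧
                PySem.Int.mod (PySem.Int.mod n 1000000) 1000 ≠ 0 from
              And.intro (Or.inr hk) hcz)]
        simp only [List.cons_append, List.nil_append]
        rw [pv_join_cons, pv_join_singleton]
        rw [pv_strip_id _
            (pv_headOK_str_append (pv_headOK_str_append (pv_headOK_str_append hKgood.1)))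
            (pv_lastOK_str_append (pv_lastOK_str_append hCgood.2)),
            hTK, hTC]
        rw [if_pos (show PySem.Int.mod (PySem.Int.mod n 1000000) 1000 ≠ 0 from hcz)]
        apply pv_str_ext
        simp only [String.toList_append, List.append_assoc, hlit]
  · -- millions group present: 10^6 ≤ n
    have hn6 : 1000000 ≤ n := by rw [hM] at hm; omega
    have hM1 : 1 ≤ PySem.Int.floordiv n 1000000 := by rw [hM]; omega
    have hM9 : PySem.Int.floordiv n 1000000 < 1000 := by rw [hM]; omega
    have hTM : pvTrio (PySem.Int.floordiv n 1000000) =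
        pvRec 3 (PySem.Int.floordiv n 1000000) := pv_trio_eq _ hM1 hM9 1
    have hMgood := pv_trio_good _ hM1 hM9
    have hsuf : pvLastOK ((if PySem.Int.floordiv n 1000000 = 1 then
        (" milhão" : String) else " milhões")).toList = true := by
      by_cases h1 : PySem.Int.floordiv n 1000000 = 1
      · rw [if_pos h1]; decide
      · rw [if_neg h1]; decide
    have hB4 : pvRec 4 n =
        pvRec 3 (PySem.Int.floordiv n 1000000) ++
          (if PySem.Int.floordiv n 1000000 = 1 then " milhão" else " milhões") ++
          (if PySem.Int.mod n 1000000 ≠ 0 then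
             " e " ++ pvRec 3 (PySem.Int.mod n 1000000) else "") := by
      have e : pvRec 4 n = pvRec (3 + 1) n := rfl
      rw [e, pv_rec_body 3, if_neg (by omega : ¬ n < 20), if_neg (by omega : ¬ n < 100),
          if_neg (by omega : ¬ n < 1000), if_neg (by omega : ¬ n < 1000000)]
    rw [if_pos (show PySem.Int.floordiv n 1000000 ≠ 0 from hm), hB4]
    by_cases hk : PySem.Int.floordiv (PySem.Int.mod n 1000000) 1000 = 0
    · by_cases hcz : PySem.Int.mod (PySem.Int.mod n 1000000) 1000 = 0
      · -- resto = 0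
        have hr0 : PySem.Int.mod n 1000000 = 0 := by
          rw [hR]; rw [hK] at hk; rw [hC] at hcz; omega
        rw [if_neg (show ¬ PySem.Int.floordiv (PySem.Int.mod n 1000000) 1000 ≠ 0 from
              fun h => h hk),
            if_neg (show ¬ PySem.Int.mod (PySem.Int.mod n 1000000) 1000 ≠ 0 from
              fun h => h hcz),
            if_neg (show ¬ PySem.Int.mod n 1000000 ≠ 0 from fun h => h hr0),
            List.append_nil, List.append_nil, pv_join_singleton,
            pv_strip_id _ (pv_headOK_str_append hMgood.1) (pv_lastOK_str_append hsuf),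
            hTM]
        apply pv_str_ext
        simp [String.toList_append]
      · -- resto = C ∈ 1..999
        have hr1 : 1 ≤ PySem.Int.mod n 1000000 := by
          rw [hR]; rw [hC] at hcz; omega
        have hrne : PySem.Int.mod n 1000000 ≠ 0 := by omega
        have hr9 : PySem.Int.mod n 1000000 < 1000 := by
          rw [hR]; rw [hK] at hk; omega
        have hCC : PySem.Int.mod (PySem.Int.mod n 1000000) 1000 =
            PySem.Int.mod n 1000000 := by rw [hC, hR]; omega
        have hTC : pvTrio (PySem.Int.mod n 1000000) =
            pvRec 3 (PySem.Int.mod n 1000000) :=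
          (pv_trio_eq _ hr1 hr9 0).trans (pv_pvRec_mid 1 _ hr9).symm
        have hCgood := pv_trio_good _ hr1 hr9
        rw [if_neg (show ¬ PySem.Int.floordiv (PySem.Int.mod n 1000000) 1000 ≠ 0 from
              fun h => h hk),
            List.append_nil, hCC,
            if_pos (show PySem.Int.mod n 1000000 ≠ 0 from hrne),
            if_pos (show (PySem.Int.floordiv n 1000000 ≠ 0 ∨
                PySem.Int.floordiv (PySem.Int.mod n 1000000) 1000 ≠ 0) ∧
                PySem.Int.mod n 1000000 ≠ 0 from And.intro (Or.inl hm) hrne)]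
        simp only [List.cons_append, List.nil_append]
        rw [pv_join_cons, pv_join_singleton]
        rw [pv_strip_id _
            (pv_headOK_str_append (pv_headOK_str_append (pv_headOK_str_append hMgood.1)))
            (pv_lastOK_str_append (pv_lastOK_str_append hCgood.2)),
            hTM, hTC]
        rw [if_pos (show PySem.Int.mod n 1000000 ≠ 0 from hrne)]
        apply pv_str_ext
        simp only [String.toList_append, List.append_assoc, hlit]
    · -- thousands group present inside resto
      have hre3 : 1000 ≤ PySem.Int.mod n 1000000 := by rw [hR]; rw [hK] at hk; omega
      have hre6 : PySem.Int.mod n 1000000 < 1000000 := by rw [hR]; omega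
      have hrne : PySem.Int.mod n 1000000 ≠ 0 := by rw [hR]; rw [hR] at hre3; omega
      have hK1 : 1 ≤ PySem.Int.floordiv (PySem.Int.mod n 1000000) 1000 := by rw [hK]; omega
      have hK9 : PySem.Int.floordiv (PySem.Int.mod n 1000000) 1000 < 1000 := by rw [hK]; omega
      have hTK : pvTrio (PySem.Int.floordiv (PySem.Int.mod n 1000000) 1000) =
          pvRec 2 (PySem.Int.floordiv (PySem.Int.mod n 1000000) 1000) :=
        pv_trio_eq _ hK1 hK9 0
      have hKgood := pv_trio_good _ hK1 hK9
      have hBr : pvRec 3 (PySem.Int.mod n 1000000) =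
          pvRec 2 (PySem.Int.floordiv (PySem.Int.mod n 1000000) 1000) ++ " mil" ++
            (if PySem.Int.mod (PySem.Int.mod n 1000000) 1000 ≠ 0 then
               " e " ++ pvRec 2 (PySem.Int.mod (PySem.Int.mod n 1000000) 1000) else "") := by
        have e : pvRec 3 (PySem.Int.mod n 1000000) = pvRec (2 + 1) (PySem.Int.mod n 1000000) := rfl
        rw [e, pv_rec_body 2, if_neg (by omega : ¬ PySem.Int.mod n 1000000 < 20),
            if_neg (by omega : ¬ PySem.Int.mod n 1000000 < 100),
            if_neg (by omega : ¬ PySem.Int.mod n 1000000 < 1000), if_pos hre6]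
      rw [if_pos (show PySem.Int.floordiv (PySem.Int.mod n 1000000) 1000 ≠ 0 from hk),
          if_pos (show PySem.Int.floordiv n 1000000 ≠ 0 ∧
              (PySem.Int.floordiv (PySem.Int.mod n 1000000) 1000 ≠ 0 ∨
               PySem.Int.mod (PySem.Int.mod n 1000000) 1000 ≠ 0) from
            And.intro hm (Or.inl hk)),
          if_pos (show PySem.Int.mod n 1000000 ≠ 0 from hrne), hBr]
      by_cases hcz : PySem.Int.mod (PySem.Int.mod n 1000000) 1000 = 0
      · rw [if_neg (show ¬ PySem.Int.mod (PySem.Int.mod n 1000000) 1000 ≠ 0 from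
              fun h => h hcz)]
        rw [if_neg (show ¬ PySem.Int.mod (PySem.Int.mod n 1000000) 1000 ≠ 0 from
              fun h => h hcz)]
        rw [List.append_nil]
        simp only [List.cons_append, List.nil_append]
        rw [pv_join_cons, pv_join_singleton]
        rw [pv_strip_id _
            (pv_headOK_str_append (pv_headOK_str_append (pv_headOK_str_append hMgood.1)))
            (pv_lastOK_str_append (pv_lastOK_str_append hmil)),
            hTM, hTK]
        apply pv_str_ext
        simp [String.toList_append, List.append_assoc]
      · have hC1 : 1 ≤ PySem.Int.mod (PySem.Int.mod n 1000000) 1000 := by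
          rw [hC] at hcz ⊢; omega
        have hC9 : PySem.Int.mod (PySem.Int.mod n 1000000) 1000 < 1000 := by rw [hC]; omega
        have hTC : pvTrio (PySem.Int.mod (PySem.Int.mod n 1000000) 1000) =
            pvRec 2 (PySem.Int.mod (PySem.Int.mod n 1000000) 1000) :=
          pv_trio_eq _ hC1 hC9 0
        have hCgood := pv_trio_good _ hC1 hC9
        rw [if_pos (show PySem.Int.mod (PySem.Int.mod n 1000000) 1000 ≠ 0 from hcz),
            if_pos (show (PySem.Int.floordiv n 1000000 ≠ 0 ∨
                PySem.Int.floordiv (PySem.Int.mod n 1000000) 1000 ≠ 0) ∧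
                PySem.Int.mod (PySem.Int.mod n 1000000) 1000 ≠ 0 from
              And.intro (Or.inl hm) hcz)]
        simp only [List.cons_append, List.nil_append]
        rw [pv_join_cons, pv_join_cons, pv_join_singleton]
        rw [pv_strip_id _
            (pv_headOK_str_append (pv_headOK_str_append (pv_headOK_str_append hMgood.1)))
            (pv_lastOK_str_append (pv_lastOK_str_append (pv_lastOK_str_append hCgood.2))),
            hTM, hTK, hTC]
        rw [if_pos (show PySem.Int.mod (PySem.Int.mod n 1000000) 1000 ≠ 0 from hcz)]
        apply pv_str_ext
        simp only [String.toList_append, List.append_assoc, hlit]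

-- ===== VERDICT (by name: the statement is the Claim_ definition above) =====
theorem numero_extenso_py_spec : Claim_equal_numero_extenso_py := by
  intro n _ hpre
  unfold Spec_numero_extenso_py
  exact pv_main n hpre.1 hpre.2
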